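-- pv_equiv track=rewrite | github.com/sarbajit125/Nptel | assignment1.py | shufflelow
-- ===== SOURCE A (Python) =====
-- def shufflelow(l1,l2):
--     l3=l1
--     k=1
--     for j in range(0,len(l2)):
--         if k<len(l3):
--             l3.insert(k,l2[j])
--             k=k+2
--         else:
--             l3.append(l2[j])
--             k=k+2
--     return(l3)
-- ===== SOURCE B (Python) =====
-- def shufflelow(l1, l2):
--     m = min(len(l1), len(l2))
--     res = []
--     for a, b in zip(l1, l2):
--         res.append(a)
--         res.append(b)
--     res += l1[m:] + l2[m:]
--     l1[:] = res
--     return l1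
-- ===== Notes on version B (the rewrite author's own statement) =====
-- stated objective: faster
-- what changed: Replaces A's insert-at-a-growing-odd-index mutation loop (each list.insert shifts the tail) with a pairing decomposition: build the interleaving from zip(l1,l2) plus the leftover tails, then assign it back with l1[:]= to keep A's in-place mutation and identity.
import Mathlib
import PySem

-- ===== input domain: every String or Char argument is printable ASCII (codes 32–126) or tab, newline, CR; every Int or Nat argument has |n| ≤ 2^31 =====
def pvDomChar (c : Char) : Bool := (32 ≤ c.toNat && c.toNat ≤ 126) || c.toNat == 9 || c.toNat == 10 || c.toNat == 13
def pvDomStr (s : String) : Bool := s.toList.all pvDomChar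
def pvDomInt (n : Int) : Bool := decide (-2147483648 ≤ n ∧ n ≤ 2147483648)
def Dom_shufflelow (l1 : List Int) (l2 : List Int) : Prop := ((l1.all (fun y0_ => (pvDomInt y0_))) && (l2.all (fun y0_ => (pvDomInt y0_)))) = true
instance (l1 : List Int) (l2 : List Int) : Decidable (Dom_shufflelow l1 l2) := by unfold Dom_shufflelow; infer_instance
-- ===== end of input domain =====

-- B replaces A's insert-at-growing-index mutation loop by a zip-pairs-plus-leftover-tails
-- decomposition (equivalence proved about the RETURN value; both Pythons mutate l1 in place).

-- ===== PORT A =====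
-- A's for-loop over range(0,len(l2)) uses j only as l2[j], so it is transliterated as the
-- recursion over l2's elements; state (l3, k) as in A.
def shufflelowLoopA : List Int → List Int → Int → List Int
  | [], l3, _ => l3
  | y :: ys, l3, k =>
    if k < (l3.length : Int) then
      shufflelowLoopA ys (PySem.List.insert l3 k y) (k + 2)
    else
      shufflelowLoopA ys (l3 ++ [y]) (k + 2)

def shufflelow (l1 : List Int) (l2 : List Int) : List Int :=
  shufflelowLoopA l2 l1 1

-- ===== PORT B =====
def shufflelow_alt (l1 : List Int) (l2 : List Int) : List Int :=
  let m := min l1.length l2.length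
  let res := (l1.zip l2).foldl (fun acc p => acc ++ [p.1, p.2]) []
  res ++ l1.drop m ++ l2.drop m

-- ===== PRECONDITION & SPEC =====
def Spec_shufflelow (l1 : List Int) (l2 : List Int) (out : List Int) : Prop := out = shufflelow_alt l1 l2
instance (l1 : List Int) (l2 : List Int) (out : List Int) : Decidable (Spec_shufflelow l1 l2 out) := by unfold Spec_shufflelow; infer_instance

-- ===== CLAIM (what is proved, stated in full; the proofs are below) =====
def Claim_equal_shufflelow : Prop := ∀ (l1 : List Int) (l2 : List Int), Dom_shufflelow l1 l2 → Spec_shufflelow l1 l2 (shufflelow l1 l2)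

-- ===== LEMMAS AND PROOFS =====

-- the mathematical interleaving both ports compute
def itl : List Int → List Int → List Int
  | [], ys => ys
  | x :: xs, [] => x :: xs
  | x :: xs, y :: ys => x :: y :: itl xs ys

-- once k has reached the length, A only appends
lemma loopA_append (ys : List Int) : ∀ (l3 : List Int) (k : Int),
    (l3.length : Int) ≤ k → shufflelowLoopA ys l3 k = l3 ++ ys := by
  induction ys with
  | nil => intro l3 k _; simp [shufflelowLoopA]
  | cons y ys ih =>
    intro l3 k h
    rw [shufflelowLoopA, if_neg (by omega)]
    rw [ih (l3 ++ [y]) (k + 2) (by simp; omega)]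
    simp

-- Python list.insert at position |P|+1 inside P ++ r :: T splices y after r
lemma take_insert_drop (P : List Int) (r : Int) (T : List Int) (y : Int) :
    List.take (P.length + 1) (P ++ r :: T) ++ y :: List.drop (P.length + 1) (P ++ r :: T)
      = P ++ r :: y :: T := by
  induction P with
  | nil => simp
  | cons p ps ih => simpa using ih

-- main invariant: processed prefix P (with k = |P|+1), unpaired rest R of l1
lemma loopA_itl (ys : List Int) : ∀ (P R : List Int),
    shufflelowLoopA ys (P ++ R) ((P.length : Int) + 1) = P ++ itl R ys := by
  induction ys with
  | nil => intro P R; cases R <;> simp [shufflelowLoopA, itl]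
  | cons y ys ih =>
    intro P R
    match R with
    | [] =>
      rw [shufflelowLoopA, if_neg (by simp)]
      rw [show P ++ ([] : List Int) ++ [y] = P ++ [y] by simp]
      rw [loopA_append ys (P ++ [y]) ((P.length : Int) + 1 + 2) (by simp)]
      simp [itl]
    | [r] =>
      rw [shufflelowLoopA, if_neg (by simp)]
      rw [show P ++ [r] ++ [y] = P ++ [r, y] ++ ([] : List Int) by simp]
      rw [show ((P.length : Int) + 1 + 2) = (((P ++ [r, y]).length : Int)) + 1 by
        push_cast [List.length_append, List.length_cons, List.length_nil]; ring]
      rw [ih (P ++ [r, y]) []]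
      simp [itl]
    | r :: r' :: R' =>
      rw [shufflelowLoopA, if_pos (by simp)]
      have hins : PySem.List.insert (P ++ r :: r' :: R') ((P.length : Int) + 1) y
          = (P ++ [r, y]) ++ r' :: R' := by
        have h1 : ((P.length : Int) + 1) = ((P.length + 1 : Nat) : Int) := by push_cast; ring
        rw [h1, PySem.List.insert_natCast _ _ _ (by simp)]
        simpa using take_insert_drop P r (r' :: R') y
      rw [hins]
      rw [show ((P.length : Int) + 1 + 2) = (((P ++ [r, y]).length : Int)) + 1 by
        push_cast [List.length_append, List.length_cons, List.length_nil]; ring]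
      rw [ih (P ++ [r, y]) (r' :: R')]
      simp [itl]

lemma foldl_pairs (zs : List (Int × Int)) : ∀ (acc : List Int),
    zs.foldl (fun acc p => acc ++ [p.1, p.2]) acc = acc ++ zs.flatMap (fun p => [p.1, p.2]) := by
  induction zs with
  | nil => intro acc; simp
  | cons z zs ih => intro acc; simp [List.foldl, ih]

lemma alt_itl (l1 : List Int) : ∀ l2, shufflelow_alt l1 l2 = itl l1 l2 := by
  induction l1 with
  | nil => intro l2; simp [shufflelow_alt, itl]
  | cons x xs ih =>
    intro l2
    cases l2 with
    | nil => simp [shufflelow_alt, itl]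
    | cons y ys =>
      have := ih ys
      simp only [shufflelow_alt, foldl_pairs, itl, List.zip] at this ⊢
      simp at this ⊢
      simpa using this

-- ===== VERDICT (by name: the statement is the Claim_ definition above) =====
theorem shufflelow_spec : Claim_equal_shufflelow := by
  intro l1 l2 _
  unfold Spec_shufflelow shufflelow
  have := loopA_itl l2 [] l1
  simp only [List.nil_append, List.length_nil, Nat.cast_zero, zero_add] at this
  rw [this, alt_itl]
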